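-- pv_equiv track=rewrite | github.com/aryaa192/AdventOfCode | Day03_2.py | co2_first_bit_checker
-- ===== SOURCE A (Python) =====
-- def co2_first_bit_checker(bit, j):
--     c_1 = []
--     c_0 = []
--     for i in range(len(bit)):  # 00100
--         if bit[i].startswith('1', j):
--             c_1.append(bit[i])
--         if bit[i].startswith('0', j):
--             c_0.append(bit[i])
--     if len(c_0) <= len(c_1):
--         return c_0
--     else:
--         return c_1
-- ===== SOURCE B (Python) =====
-- def co2_first_bit_checker(bit, j):
--     n0 = 0
--     n1 = 0
--     for s in bit:
--         if s.startswith('0', j):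
--             n0 += 1
--         elif s.startswith('1', j):
--             n1 += 1
--     c = '0' if n0 <= n1 else '1'
--     return [s for s in bit if s.startswith(c, j)]
-- ===== Notes on version B (the rewrite author's own statement) =====
-- stated objective: simpler
-- what changed: Counts the size of each bit-group in one pass and then materializes only the winning group with a single filter, instead of eagerly building both candidate lists and comparing their lengths.
import Mathlib
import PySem

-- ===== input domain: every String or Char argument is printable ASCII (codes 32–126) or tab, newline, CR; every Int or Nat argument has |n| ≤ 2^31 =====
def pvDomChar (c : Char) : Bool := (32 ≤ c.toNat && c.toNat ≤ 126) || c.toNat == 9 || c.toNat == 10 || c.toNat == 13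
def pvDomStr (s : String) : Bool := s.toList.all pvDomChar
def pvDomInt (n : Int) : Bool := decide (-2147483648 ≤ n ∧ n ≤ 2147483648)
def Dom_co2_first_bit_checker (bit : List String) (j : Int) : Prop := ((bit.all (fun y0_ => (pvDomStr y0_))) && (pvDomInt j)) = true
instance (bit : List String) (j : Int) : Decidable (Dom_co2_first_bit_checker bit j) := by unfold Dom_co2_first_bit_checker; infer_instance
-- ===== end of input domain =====

-- B counts the size of each bit-group in one pass and materializes only the winning
-- group with a single filter, instead of building both candidate lists (objective: simpler).

-- shared primitive: Python's s.startswith(p, j) (start offset has slice semantics)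
def pySW (s p : String) (j : Int) : Bool :=
  PySem.Chars.startswith (PySem.List.slice s.toList (some j) none) p.toList

-- ===== PORT A =====
def co2_first_bit_checker (bit : List String) (j : Int) : List String :=
  let r := bit.foldl (fun (acc : List String × List String) s =>
    (if pySW s "1" j then acc.1 ++ [s] else acc.1,
     if pySW s "0" j then acc.2 ++ [s] else acc.2)) ([], [])
  if r.2.length ≤ r.1.length then r.2 else r.1

-- ===== PORT B =====
def co2_first_bit_checker_alt (bit : List String) (j : Int) : List String :=
  let c := bit.foldl (fun (acc : Int × Int) s =>
    if pySW s "0" j then (acc.1 + 1, acc.2)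
    else if pySW s "1" j then (acc.1, acc.2 + 1)
    else acc) (0, 0)
  let ch := if c.1 ≤ c.2 then "0" else "1"
  bit.filter (fun s => pySW s ch j)

-- ===== PRECONDITION & SPEC =====
def Spec_co2_first_bit_checker (bit : List String) (j : Int) (out : List String) : Prop := out = co2_first_bit_checker_alt bit j
instance (bit : List String) (j : Int) (out : List String) : Decidable (Spec_co2_first_bit_checker bit j out) := by unfold Spec_co2_first_bit_checker; infer_instance

-- ===== CLAIM (what is proved, stated in full; the proofs are below) =====
def Claim_equal_co2_first_bit_checker : Prop := ∀ (bit : List String) (j : Int), Dom_co2_first_bit_checker bit j → Spec_co2_first_bit_checker bit j (co2_first_bit_checker bit j)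

-- ===== LEMMAS AND PROOFS =====

-- a string cannot start with both '0' and '1' at the same offset
theorem pySW_disjoint (s : String) (j : Int) (h : pySW s "0" j = true) :
    pySW s "1" j = false := by
  by_contra h1
  rw [Bool.not_eq_false] at h1
  unfold pySW at h h1
  rw [PySem.Chars.startswith_iff] at h h1
  rcases h with ⟨t0, h0⟩
  rcases h1 with ⟨t1, ht1⟩
  rw [← h0] at ht1
  simp at ht1

-- A's loop builds exactly the two filtered lists
theorem foldA_eq (j : Int) (l : List String) (c1 c0 : List String) :
    l.foldl (fun (acc : List String × List String) s =>
      (if pySW s "1" j then acc.1 ++ [s] else acc.1,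
       if pySW s "0" j then acc.2 ++ [s] else acc.2)) (c1, c0)
    = (c1 ++ l.filter (fun s => pySW s "1" j), c0 ++ l.filter (fun s => pySW s "0" j)) := by
  induction l generalizing c1 c0 with
  | nil => simp
  | cons s t ih =>
    simp only [List.foldl_cons, List.filter_cons, ih]
    by_cases h1 : pySW s "1" j <;> by_cases h0 : pySW s "0" j <;> simp [h1, h0]

-- B's loop computes the two counts
theorem foldB_eq (j : Int) (l : List String) (a b : Int) :
    l.foldl (fun (acc : Int × Int) s =>
      if pySW s "0" j then (acc.1 + 1, acc.2)
      else if pySW s "1" j then (acc.1, acc.2 + 1)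
      else acc) (a, b)
    = (a + (l.countP (fun s => pySW s "0" j) : Int),
       b + (l.countP (fun s => pySW s "1" j) : Int)) := by
  induction l generalizing a b with
  | nil => simp
  | cons s t ih =>
    simp only [List.foldl_cons, List.countP_cons]
    by_cases h0 : pySW s "0" j
    · have h1 : pySW s "1" j = false := pySW_disjoint s j h0
      simp [h0, h1, ih]
      ring
    · by_cases h1 : pySW s "1" j <;> simp [h0, h1, ih] <;> ring

-- ===== VERDICT (by name: the statement is the Claim_ definition above) =====
theorem co2_first_bit_checker_spec : Claim_equal_co2_first_bit_checker := by
  intro bit j _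
  unfold Spec_co2_first_bit_checker co2_first_bit_checker co2_first_bit_checker_alt
  simp only [foldA_eq, foldB_eq, List.nil_append, zero_add]
  have e0 : (bit.filter (fun s => pySW s "0" j)).length = bit.countP (fun s => pySW s "0" j) :=
    by rw [List.countP_eq_length_filter]
  have e1 : (bit.filter (fun s => pySW s "1" j)).length = bit.countP (fun s => pySW s "1" j) :=
    by rw [List.countP_eq_length_filter]
  by_cases h : (bit.countP (fun s => pySW s "0" j) : Int) ≤ (bit.countP (fun s => pySW s "1" j) : Int)
  · have hn : (bit.filter (fun s => pySW s "0" j)).length ≤ (bit.filter (fun s => pySW s "1" j)).length := by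
      rw [e0, e1]; exact_mod_cast h
    simp [h, hn]
  · have hn : ¬ (bit.filter (fun s => pySW s "0" j)).length ≤ (bit.filter (fun s => pySW s "1" j)).length := by
      rw [e0, e1]; intro hc; exact h (by exact_mod_cast hc)
    simp [h, hn]
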